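-- pv_equiv track=rewrite | github.com/kudinov-fedor/python-core-training | dyurchen/remove_all_before.py | remove_all_before
-- ===== SOURCE A (Python) =====
-- from typing import Iterable
--
-- def remove_all_before(items: list, border: int) -> Iterable:
--     new_list = []
--     find_border = bool
--     for item in items:
--         if item == border:
--             find_border = True
--
--     if find_border == True:
--         border_position = items.index(border)
--         while border_position < len(items):
--             new_list.append(items[border_position])
--             border_position += 1
--         return new_list
--     else:
--         return items
-- ===== SOURCE B (Python) =====
-- def remove_all_before(items: list, border: int):
--     found = False
--     result = []
--     for item in items:
--         if found or item == border:
--             found = True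
--             result.append(item)
--     return result if found else items
-- ===== Notes on version B (the rewrite author's own statement) =====
-- stated objective: simpler
-- what changed: A scans the whole list to set a flag, then calls .index and copies the tail element-by-element with an index while-loop (three traversals); B is a single pass maintaining a found flag and appending items from the first border onward, returning the original list if border is absent.
import Mathlib
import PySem

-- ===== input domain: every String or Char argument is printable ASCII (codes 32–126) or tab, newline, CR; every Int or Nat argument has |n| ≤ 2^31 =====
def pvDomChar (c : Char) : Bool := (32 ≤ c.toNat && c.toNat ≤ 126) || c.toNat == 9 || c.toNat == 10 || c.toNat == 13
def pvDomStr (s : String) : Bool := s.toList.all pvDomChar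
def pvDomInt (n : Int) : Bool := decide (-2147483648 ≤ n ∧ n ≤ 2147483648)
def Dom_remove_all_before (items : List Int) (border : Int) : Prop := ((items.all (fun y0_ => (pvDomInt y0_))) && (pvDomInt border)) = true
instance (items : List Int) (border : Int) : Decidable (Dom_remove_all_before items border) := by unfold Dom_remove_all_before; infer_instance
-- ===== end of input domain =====

-- B replaces A's three traversals (flag scan, .index, index-by-index tail copy) with one pass; objective: simpler.

-- ===== PORT A =====
-- the `while border_position < len(items): new_list.append(items[border_position]); border_position += 1` loop
def removeLoopA (items : List Int) (pos : Nat) : List Int :=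
  if h : pos < items.length then items[pos] :: removeLoopA items (pos + 1) else []
termination_by items.length - pos

def remove_all_before (items : List Int) (border : Int) : List Int :=
  -- `find_border = bool` then the for-loop: find_border == True iff border occurs
  let find_border := items.foldl (fun acc item => if item == border then true else acc) false
  if find_border = true then
    match PySem.List.index? items border with
    | some i => removeLoopA items i
    | none => []   -- unreachable: find_border guarantees membership (Python .index would raise only here)
  else
    items

-- ===== PORT B =====
def remove_all_before_alt (items : List Int) (border : Int) : List Int :=
  let st := items.foldl
    (fun (st : Bool × List Int) item =>
      if st.1 || item == border then (true, st.2 ++ [item]) else st)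
    (false, [])
  if st.1 then st.2 else items

-- ===== PRECONDITION & SPEC =====
def Spec_remove_all_before (items : List Int) (border : Int) (out : List Int) : Prop := out = remove_all_before_alt items border
instance (items : List Int) (border : Int) (out : List Int) : Decidable (Spec_remove_all_before items border out) := by unfold Spec_remove_all_before; infer_instance

-- ===== CLAIM (what is proved, stated in full; the proofs are below) =====
def Claim_equal_remove_all_before : Prop := ∀ (items : List Int) (border : Int), Dom_remove_all_before items border → Spec_remove_all_before items border (remove_all_before items border)

-- ===== LEMMAS AND PROOFS =====

-- A's flag fold detects membership
theorem flagA_eq (items : List Int) (border : Int) (acc : Bool) :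
    items.foldl (fun acc item => if item == border then true else acc) acc
      = (acc || decide (border ∈ items)) := by
  induction items generalizing acc with
  | nil => simp
  | cons x xs ih =>
    rw [List.foldl_cons, ih]
    by_cases h : x = border
    · subst h; simp
    · have : (x == border) = false := by simp [h]
      rw [this]
      simp [List.mem_cons, Ne.symm h]

-- A's while-loop is List.drop
theorem removeLoopA_eq_drop (items : List Int) (pos : Nat) :
    removeLoopA items pos = items.drop pos := by
  fun_induction removeLoopA items pos with
  | case1 pos h ih => rw [ih, List.drop_eq_getElem_cons h]
  | case2 pos h => rw [List.drop_eq_nil_of_le (by omega)]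

-- B's fold once the flag is set: append the rest
theorem foldB_true (border : Int) (l acc : List Int) :
    l.foldl (fun (st : Bool × List Int) item =>
        if st.1 || item == border then (true, st.2 ++ [item]) else st) (true, acc)
      = (true, acc ++ l) := by
  induction l generalizing acc with
  | nil => simp
  | cons x xs ih =>
    rw [List.foldl_cons, if_pos (by simp), ih]
    simp

-- membership gives idxOf? = some idxOf
theorem idxOf?_eq_some_of_mem (l : List Int) (b : Int) (h : b ∈ l) :
    l.idxOf? b = some (l.idxOf b) := by
  induction l with
  | nil => simp at h
  | cons x xs ih =>
    by_cases hx : x = b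
    · subst hx; simp [List.idxOf?_cons, List.idxOf_cons_self]
    · rcases List.mem_cons.mp h with h1 | h2
      · exact absurd h1.symm hx
      · simp [List.idxOf?_cons, hx, ih h2, List.idxOf_cons_ne _ hx]

-- B's fold before the flag is set: drop until the first border
theorem foldB_false (border : Int) (l : List Int) :
    l.foldl (fun (st : Bool × List Int) item =>
        if st.1 || item == border then (true, st.2 ++ [item]) else st) (false, [])
      = if border ∈ l then (true, l.drop (l.idxOf border)) else (false, []) := by
  induction l with
  | nil => simp
  | cons x xs ih =>
    rw [List.foldl_cons]
    by_cases h : x = border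
    · subst h
      rw [if_pos (by simp), foldB_true]
      simp [List.idxOf_cons_self]
    · rw [if_neg (by simp [h]), ih]
      by_cases hm : border ∈ xs
      · rw [if_pos hm, if_pos (List.mem_cons.mpr (Or.inr hm)), List.idxOf_cons_ne _ h]
        simp
      · rw [if_neg hm, if_neg (by simp [Ne.symm h, hm])]

-- ===== VERDICT (by name: the statement is the Claim_ definition above) =====
theorem remove_all_before_spec : Claim_equal_remove_all_before := by
  intro items border _
  unfold Spec_remove_all_before remove_all_before remove_all_before_alt
  rw [flagA_eq, foldB_false]
  by_cases hm : border ∈ items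
  · have hidx : PySem.List.index? items border = some (items.idxOf border) := by
      rw [PySem.List.index?_eq_idxOf?, idxOf?_eq_some_of_mem _ _ hm]
    simp only [Bool.false_or, hm, decide_true, if_pos, hidx, removeLoopA_eq_drop]
  · simp [hm]
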